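-- pv_equiv track=rewrite | github.com/Energinet-DataHub/opengeh-python-packages | source/spark_sql_migrations/spark_sql_migrations/migrations/sql_file_executor.py | _split_string_by_go
-- ===== SOURCE A (Python) =====
-- def _split_string_by_go(sql_content: str) -> list[str]:
--     """
--     Databricks doesn't support multi-statement queries.
--     So this emulates the "GO" used with SQL Server T-SQL.
--     """
--     lines = sql_content.replace("\r\n", "\n").split("\n")
--     sections = []
--     current_section: list[str] = []
--
--     for line in lines:
--         if "go" == line.lower().strip():
--             if current_section:
--                 sections.append("\n".join(current_section))
--                 current_section = []
--         else:
--             current_section.append(line)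
--
--     if current_section:
--         sections.append("\n".join(current_section))
--
--     return [s for s in sections if s and not s.isspace()]
-- ===== SOURCE B (Python) =====
-- def _split_string_by_go(sql_content: str) -> list[str]:
--     """
--     Databricks doesn't support multi-statement queries.
--     So this emulates the "GO" used with SQL Server T-SQL.
--     """
--     lines = sql_content.replace("\r\n", "\n").split("\n")
--     cuts = [i for i, line in enumerate(lines) if line.lower().strip() == "go"]
--     starts = [0] + [i + 1 for i in cuts]
--     ends = cuts + [len(lines)]
--     sections = ["\n".join(lines[a:b]) for a, b in zip(starts, ends)]
--     return [s for s in sections if s and not s.isspace()]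
-- ===== Notes on version B (the rewrite author's own statement) =====
-- stated objective: alternative
-- what changed: Replaces A's flush-on-delimiter state machine (mutable accumulator with in-loop and post-loop flushes guarded by a nonemptiness test) by an index-based decomposition: collect the positions of GO lines in one comprehension, derive segment boundaries by zipping starts with ends, and build each section as a join of a slice; the shared final filter subsumes A's nonemptiness guards.
import Mathlib
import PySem

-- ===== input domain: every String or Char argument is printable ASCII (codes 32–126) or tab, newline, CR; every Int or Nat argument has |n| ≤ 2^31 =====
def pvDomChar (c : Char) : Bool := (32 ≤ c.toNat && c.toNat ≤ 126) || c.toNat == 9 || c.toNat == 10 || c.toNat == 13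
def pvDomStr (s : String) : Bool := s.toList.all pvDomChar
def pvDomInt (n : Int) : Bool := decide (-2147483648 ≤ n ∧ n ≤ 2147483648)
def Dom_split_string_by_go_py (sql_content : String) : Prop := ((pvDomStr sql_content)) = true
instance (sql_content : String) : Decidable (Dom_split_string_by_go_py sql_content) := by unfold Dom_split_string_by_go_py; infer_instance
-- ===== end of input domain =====

-- B replaces A's flush-on-delimiter state machine by collecting GO-line indices and slicing between them (objective: alternative, same cost).

-- shared helpers (both Pythons contain these very expressions)
def pvIsGo (line : String) : Bool := PySem.Str.strip (PySem.Str.lower line) == "go"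
def pvJoin (xs : List String) : String := PySem.Str.join "\n" xs
def pvKeep (s : String) : Bool := !(s == "") && !(PySem.Str.strIsspace s)

-- ===== PORT A =====
def pvLoopA : List String → List String → List String → List String
  | [], sections, current =>
      if current.isEmpty then sections else sections ++ [pvJoin current]
  | line :: ls, sections, current =>
      if pvIsGo line then
        (if current.isEmpty then pvLoopA ls sections current
         else pvLoopA ls (sections ++ [pvJoin current]) [])
      else pvLoopA ls sections (current ++ [line])

def split_string_by_go_py (sql_content : String) : List String :=
  let lines := (PySem.Str.split? (PySem.Str.replace sql_content "\r\n" "\n") "\n").getD []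
  (pvLoopA lines [] []).filter pvKeep

-- ===== PORT B =====
def pvCuts (lines : List String) : List Int :=
  ((PySem.List.enumerate lines).filter (fun p => pvIsGo p.2)).map (·.1)

def split_string_by_go_py_alt (sql_content : String) : List String :=
  let lines := (PySem.Str.split? (PySem.Str.replace sql_content "\r\n" "\n") "\n").getD []
  let cuts := pvCuts lines
  let starts := (0 : Int) :: cuts.map (· + 1)
  let ends := cuts ++ [(lines.length : Int)]
  let sections := (starts.zip ends).map (fun p => pvJoin (PySem.List.slice lines (some p.1) (some p.2)))
  sections.filter pvKeep

-- ===== PRECONDITION & SPEC =====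
def Spec_split_string_by_go_py (sql_content : String) (out : List String) : Prop := out = split_string_by_go_py_alt sql_content
instance (sql_content : String) (out : List String) : Decidable (Spec_split_string_by_go_py sql_content out) := by unfold Spec_split_string_by_go_py; infer_instance

-- ===== CLAIM (what is proved, stated in full; the proofs are below) =====
def Claim_equal_split_string_by_go_py : Prop := ∀ (sql_content : String), Dom_split_string_by_go_py sql_content → Spec_split_string_by_go_py sql_content (split_string_by_go_py sql_content)

-- ===== LEMMAS AND PROOFS =====

lemma pv_enumerate_shift {α : Type} (ls : List α) (s : Int) :
    PySem.List.enumerate ls (s + 1) = (PySem.List.enumerate ls s).map (fun p => (p.1 + 1, p.2)) := by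
  induction ls generalizing s with
  | nil => simp [PySem.List.enumerate_nil]
  | cons x xs ih =>
      rw [PySem.List.enumerate_cons, PySem.List.enumerate_cons, List.map_cons, ← ih]

lemma pvCuts_cons (l : String) (ls : List String) :
    pvCuts (l :: ls) = (if pvIsGo l then [(0 : Int)] else []) ++ (pvCuts ls).map (· + 1) := by
  unfold pvCuts
  rw [PySem.List.enumerate_cons, show (0 : Int) + 1 = 0 + 1 from rfl, pv_enumerate_shift]
  rw [List.filter_cons]
  cases h : pvIsGo l <;>
    simp [List.filter_map, List.map_map, Function.comp_def]

lemma pvCuts_nonneg : ∀ (ls : List String), ∀ x ∈ pvCuts ls, 0 ≤ x := by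
  intro ls
  induction ls with
  | nil => intro x hx; simp [pvCuts, PySem.List.enumerate_nil] at hx
  | cons l t ih =>
      intro x hx
      rw [pvCuts_cons] at hx
      simp only [List.mem_append, List.mem_map] at hx
      rcases hx with h | ⟨y, hy, rfl⟩
      · split at h <;> simp_all
      · have := ih y hy; omega

lemma pv_slice_shift {α : Type} (l : α) (ls : List α) (a b : Int) (ha : 0 ≤ a) (hb : 0 ≤ b) :
    PySem.List.slice (l :: ls) (some (a + 1)) (some (b + 1)) = PySem.List.slice ls (some a) (some b) := by
  rw [PySem.List.slice_toNat (l :: ls) (by omega) (by omega), PySem.List.slice_toNat ls ha hb]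
  rw [show (a + 1).toNat = a.toNat + 1 by omega, List.drop_succ_cons]
  congr 1
  omega

lemma pv_slice_head {α : Type} (l : α) (ls : List α) (b : Int) (hb : 0 ≤ b) :
    PySem.List.slice (l :: ls) (some 0) (some (b + 1)) = l :: PySem.List.slice ls (some 0) (some b) := by
  rw [PySem.List.slice_toNat (l :: ls) (by omega) (by omega), PySem.List.slice_toNat ls le_rfl hb]
  have h1 : (b + 1).toNat = b.toNat + 1 := by omega
  simp [h1]

lemma pv_segs_eq : ∀ (lines : List String),
    (((0 : Int) :: (pvCuts lines).map (· + 1)).zip (pvCuts lines ++ [(lines.length : Int)])).map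
        (fun p => PySem.List.slice lines (some p.1) (some p.2))
      = List.splitOnP pvIsGo lines := by
  intro lines
  induction lines with
  | nil => simp [pvCuts, PySem.List.enumerate_nil, PySem.List.slice]
  | cons l ls ih =>
      have hnn := pvCuts_nonneg ls
      cases h : pvIsGo l with
      | true =>
          have hcuts : pvCuts (l :: ls) = 0 :: (pvCuts ls).map (· + 1) := by
            rw [pvCuts_cons, h]; simp
          rw [hcuts, List.length_cons,
            show ((ls.length + 1 : Nat) : Int) = (ls.length : Int) + 1 by push_cast; ring]
          simp only [List.map_cons, List.cons_append]
          rw [show (pvCuts ls).map (· + 1) ++ [(ls.length : Int) + 1]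
                = (pvCuts ls ++ [(ls.length : Int)]).map (· + 1) by simp]
          rw [show ((0 : Int) + 1) :: ((pvCuts ls).map (· + 1)).map (· + 1)
                = ((0 : Int) :: (pvCuts ls).map (· + 1)).map (· + 1) by simp]
          rw [List.zip_cons_cons, List.zip_map, List.map_cons, List.map_map]
          rw [List.splitOnP_cons, if_pos h]
          refine List.cons_eq_cons.mpr ⟨?_, ?_⟩
          · rw [PySem.List.slice_toNat (l :: ls) le_rfl le_rfl]; simp
          · rw [← ih]
            apply List.map_congr_left
            intro p hp
            have hmem := List.of_mem_zip (a := p.1) (b := p.2) (by simpa using hp)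
            have h1 : 0 ≤ p.1 := by
              rcases List.mem_cons.mp hmem.1 with h1 | h1
              · omega
              · obtain ⟨y, hy, he⟩ := List.mem_map.mp h1
                have := hnn y hy; omega
            have h2 : 0 ≤ p.2 := by
              rcases List.mem_append.mp hmem.2 with h2 | h2
              · have := hnn _ h2; omega
              · simp at h2; omega
            simp only [Function.comp_def, Prod.map]
            exact pv_slice_shift l ls p.1 p.2 h1 h2
      | false =>
          have hcuts : pvCuts (l :: ls) = (pvCuts ls).map (· + 1) := by
            rw [pvCuts_cons, h]; simp
          rw [hcuts, List.length_cons,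
            show ((ls.length + 1 : Nat) : Int) = (ls.length : Int) + 1 by push_cast; ring]
          obtain ⟨e0, E', hE⟩ := List.exists_cons_of_ne_nil
            (show pvCuts ls ++ [(ls.length : Int)] ≠ [] by simp)
          have hEnn : ∀ x ∈ e0 :: E', 0 ≤ x := by
            rw [← hE]; intro x hx
            rcases List.mem_append.mp hx with hx | hx
            · exact hnn x hx
            · simp at hx; omega
          rw [show (pvCuts ls).map (· + 1) ++ [(ls.length : Int) + 1]
                = (e0 + 1) :: E'.map (· + 1) by
              have := congrArg (List.map (· + (1 : Int))) hE
              simpa using this]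
          rw [List.zip_cons_cons, List.map_cons]
          rw [List.splitOnP_cons, if_neg (by simp [h]), ← ih, hE, List.zip_cons_cons,
            List.map_cons, List.modifyHead_cons]
          refine List.cons_eq_cons.mpr ⟨?_, ?_⟩
          · exact pv_slice_head l ls e0 (hEnn e0 (by simp))
          · rw [List.zip_map, List.map_map]
            apply List.map_congr_left
            intro p hp
            have hmem := List.of_mem_zip (a := p.1) (b := p.2) (by simpa using hp)
            have h1 : 0 ≤ p.1 := by
              obtain ⟨y, hy, he⟩ := List.mem_map.mp hmem.1
              have := hnn y hy; omega
            have h2 : 0 ≤ p.2 := hEnn p.2 (List.mem_cons_of_mem _ hmem.2)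
            simp only [Function.comp_def, Prod.map]
            exact pv_slice_shift l ls p.1 p.2 h1 h2

lemma pv_modifyHead_nilAppend (xs : List (List String)) :
    xs.modifyHead (fun g => [] ++ g) = xs := by
  cases xs <;> simp

lemma pv_modifyHead_modifyHead {α : Type} (f g : α → α) (xs : List α) :
    (xs.modifyHead g).modifyHead f = xs.modifyHead (fun x => f (g x)) := by
  cases xs <;> simp

lemma pv_loopA_eq : ∀ (lines sections current : List String),
    pvLoopA lines sections current
      = sections ++ (((List.splitOnP pvIsGo lines).modifyHead (current ++ ·)).filter
          (fun g => !g.isEmpty)).map pvJoin := by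
  intro lines
  induction lines with
  | nil =>
      intro sections current
      rw [List.splitOnP_nil]
      cases hc : current.isEmpty
      · have hne : current ≠ [] := by simpa [List.isEmpty_iff] using hc
        simp [pvLoopA, hc]
      · have hnil : current = [] := List.isEmpty_iff.mp hc
        subst hnil
        simp [pvLoopA]
  | cons l ls ih =>
      intro sections current
      cases h : pvIsGo l with
      | true =>
          rw [List.splitOnP_cons, if_pos h]
          cases hc : current.isEmpty
          · have hne : current ≠ [] := by simpa [List.isEmpty_iff] using hc
            rw [show pvLoopA (l :: ls) sections current
                  = pvLoopA ls (sections ++ [pvJoin current]) [] by simp [pvLoopA, h, hc]]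
            rw [ih, pv_modifyHead_nilAppend, List.modifyHead_cons, List.filter_cons]
            simp [hne, List.append_assoc]
          · have hnil : current = [] := List.isEmpty_iff.mp hc
            subst hnil
            rw [show pvLoopA (l :: ls) sections ([] : List String)
                  = pvLoopA ls sections [] by simp [pvLoopA, h]]
            rw [ih, pv_modifyHead_nilAppend, List.modifyHead_cons, List.filter_cons]
            simp
      | false =>
          rw [List.splitOnP_cons, if_neg (by simp [h])]
          rw [show pvLoopA (l :: ls) sections current
                = pvLoopA ls sections (current ++ [l]) by simp [pvLoopA, h]]
          rw [ih, pv_modifyHead_modifyHead]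
          have hfun : (fun x => current ++ (l :: x)) = (fun x => (current ++ [l]) ++ x) := by
            funext x; simp
          rw [hfun]

lemma pv_filter_join_empty : ∀ (segs : List (List String)),
    ((segs.filter (fun g => !g.isEmpty)).map pvJoin).filter pvKeep
      = (segs.map pvJoin).filter pvKeep := by
  intro segs
  induction segs with
  | nil => rfl
  | cons g gs ih =>
      cases hg : g.isEmpty
      · simp [List.filter_cons, hg, List.map_cons, ih]
      · have : g = [] := by simpa [List.isEmpty_iff] using hg
        subst this
        have hjoin : pvKeep (pvJoin []) = false := by decide
        simp [List.map_cons, hjoin, ih]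

lemma pv_main (lines : List String) :
    (pvLoopA lines [] []).filter pvKeep
      = ((((0 : Int) :: (pvCuts lines).map (· + 1)).zip (pvCuts lines ++ [(lines.length : Int)])).map
          (fun p => pvJoin (PySem.List.slice lines (some p.1) (some p.2)))).filter pvKeep := by
  rw [pv_loopA_eq, List.nil_append, pv_modifyHead_nilAppend, pv_filter_join_empty]
  rw [show (fun p : Int × Int => pvJoin (PySem.List.slice lines (some p.1) (some p.2)))
        = pvJoin ∘ (fun p : Int × Int => PySem.List.slice lines (some p.1) (some p.2)) from rfl,
    ← List.map_map, pv_segs_eq]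

-- ===== VERDICT (by name: the statement is the Claim_ definition above) =====
theorem split_string_by_go_py_spec : Claim_equal_split_string_by_go_py := by
  intro sql_content _
  unfold Spec_split_string_by_go_py split_string_by_go_py split_string_by_go_py_alt
  exact pv_main _
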